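-- pv_equiv track=rewrite | github.com/shandianchengzi/windows_word_decrypt | main.py | generate_passwords
-- ===== SOURCE A (Python) =====
-- def generate_passwords(try_words):
--     """
--     根据给定的单词列表生成所有可能的密码组合。
--
--     :param try_words: 用于生成密码的单词列表
--     :return: 密码列表
--     """
--     try_passwd = []
--     for i in range(1, 4):
--         for j in range(0, len(try_words)):
--             for k in range(0, len(try_words)):
--                 for l in range(0, len(try_words)):
--                     passwd = try_words[j]
--                     if i > 1:
--                         passwd += try_words[k]
--                     if i > 2:
--                         passwd += try_words[l]
--                     try_passwd.append(passwd)
--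
--     # 去重并返回
--     return list(set(try_passwd))
-- ===== SOURCE B (Python) =====
-- def generate_passwords(try_words):
--     # deduplicated pairs, in first-occurrence order
--     pairs = list(dict.fromkeys(a + b for a in try_words for b in try_words))
--     result = set(try_words)
--     result.update(pairs)
--     # triples: extend each (already deduplicated) pair once per word
--     result.update(p + c for p in pairs for c in try_words)
--     return list(result)
-- ===== Notes on version B (the rewrite author's own statement) =====
-- stated objective: alternative
-- what changed: Replaces A's 4-deep index loop (which appends 3*n^3 strings, recomputing every level with dead inner loops, then dedups once at the end) by an incremental build: deduplicate the pairs once, then form each triple from an already-deduplicated pair, updating one result set level by level.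
import Mathlib
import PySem

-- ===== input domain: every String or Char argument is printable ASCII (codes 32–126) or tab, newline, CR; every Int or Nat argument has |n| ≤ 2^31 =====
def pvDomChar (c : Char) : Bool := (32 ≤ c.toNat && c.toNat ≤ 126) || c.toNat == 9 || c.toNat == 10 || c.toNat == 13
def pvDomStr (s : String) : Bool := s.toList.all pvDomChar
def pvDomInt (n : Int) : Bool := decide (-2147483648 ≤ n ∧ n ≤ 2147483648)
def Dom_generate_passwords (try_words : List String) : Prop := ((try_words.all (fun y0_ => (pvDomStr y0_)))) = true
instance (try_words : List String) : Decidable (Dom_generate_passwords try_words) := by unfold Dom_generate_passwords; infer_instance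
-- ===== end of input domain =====

-- B builds the password levels incrementally (pairs deduplicated once, each triple formed from an
-- already-deduplicated pair, one result set updated level by level) instead of A's 4-deep index
-- loop that appends 3·n³ strings and dedups at the end; objective: alternative decomposition.

-- ===== PORT A =====
-- literal transliteration of A: for i in range(1,4): for j/k/l in range(len(try_words)):
-- build passwd by conditional +=, append; finally list(set(...)) (ordered dedup; output compared as a set)
def generate_passwords (try_words : List String) : List String :=
  let try_passwd : List String :=
    (PySem.List.pyRange 1 4 1).foldl (fun acc i =>
      (PySem.List.pyRange 0 (PySem.List.len try_words) 1).foldl (fun acc j =>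
        (PySem.List.pyRange 0 (PySem.List.len try_words) 1).foldl (fun acc k =>
          (PySem.List.pyRange 0 (PySem.List.len try_words) 1).foldl (fun acc l =>
            let passwd := PySem.List.pyGetD try_words j "";
            let passwd := if i > 1 then passwd ++ PySem.List.pyGetD try_words k "" else passwd;
            let passwd := if i > 2 then passwd ++ PySem.List.pyGetD try_words l "" else passwd;
            acc ++ [passwd]) acc) acc) acc) []
  PySem.Set.ofList try_passwd

-- ===== PORT B =====
-- transliteration of Source B: pairs = list(dict.fromkeys(a+b ...)); result = set(try_words);
-- result.update(pairs); result.update(p+c for p in pairs for c in try_words); list(result)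
-- (sets in first-insertion order; output compared as a set)
def generate_passwords_alt (try_words : List String) : List String :=
  let pairs : List String :=
    PySem.List.dedup (try_words.flatMap (fun a => try_words.map (fun b => a ++ b)))
  let result : PySem.Set String := PySem.Set.ofList try_words
  let result := PySem.Set.update result pairs
  let result := PySem.Set.update result (pairs.flatMap (fun p => try_words.map (fun c => p ++ c)))
  result

-- ===== PRECONDITION & SPEC =====
def Spec_generate_passwords (try_words : List String) (out : List String) : Prop := out = generate_passwords_alt try_words
instance (try_words : List String) (out : List String) : Decidable (Spec_generate_passwords try_words out) := by unfold Spec_generate_passwords; infer_instance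

-- ===== CLAIM (what is proved, stated in full; the proofs are below) =====
def Claim_equal_generate_passwords : Prop := ∀ (try_words : List String), Dom_generate_passwords try_words → Spec_generate_passwords try_words (generate_passwords try_words)

-- ===== LEMMAS AND PROOFS =====

-- update by a list whose elements are already present is a no-op
theorem pv_update_absorb {α : Type} [BEq α] [LawfulBEq α] (ys : List α) :
    ∀ (s : PySem.Set α), (∀ y ∈ ys, y ∈ s) → PySem.Set.update s ys = s := by
  induction ys with
  | nil => intro s _; rfl
  | cons y ys ih =>
    intro s h
    rw [PySem.Set.update_cons, PySem.Set.add_of_mem (h y (by simp))]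
    exact ih s (fun z hz => h z (by simp [hz]))

-- updating by a replicated block is one add
theorem pv_update_replicate {α : Type} [BEq α] [LawfulBEq α] (m : Nat) (hm : 0 < m)
    (s : PySem.Set α) (x : α) :
    PySem.Set.update s (List.replicate m x) = PySem.Set.add s x := by
  obtain ⟨m', rfl⟩ : ∃ m', m = m' + 1 := ⟨m - 1, by omega⟩
  rw [List.replicate_succ, PySem.Set.update_cons]
  exact pv_update_absorb _ _ (fun y hy => by
    simp only [List.mem_replicate] at hy
    simp [hy.2, PySem.Set.mem_add])

-- update only depends on each block up to its dedup behaviour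
theorem pv_update_flatMap_congr {α β : Type} [BEq β] [LawfulBEq β] (l : List α)
    (f g : α → List β)
    (h : ∀ x ∈ l, ∀ s : PySem.Set β, PySem.Set.update s (f x) = PySem.Set.update s (g x)) :
    ∀ s : PySem.Set β, PySem.Set.update s (l.flatMap f) = PySem.Set.update s (l.flatMap g) := by
  induction l with
  | nil => intro s; rfl
  | cons x l ih =>
    intro s
    rw [List.flatMap_cons, List.flatMap_cons, PySem.Set.update_append, PySem.Set.update_append,
      h x (by simp)]
    exact ih (fun y hy s' => h y (by simp [hy]) s') _

-- deduplicating the update argument changes nothing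
theorem pv_update_ofList {α : Type} [BEq α] [LawfulBEq α] (s : PySem.Set α) (t : List α) :
    PySem.Set.update s (PySem.Set.ofList t) = PySem.Set.update s t := by
  rw [PySem.Set.update_eq_append_filter, PySem.Set.update_eq_append_filter, PySem.Set.ofList_ofList]

-- KEY: blocks generated from duplicate generators are absorbed — the generator list may be deduplicated
theorem pv_update_flatMap_ofList {α β : Type} [BEq α] [LawfulBEq α] [BEq β] [LawfulBEq β]
    (f : α → List β) (l : List α) :
    ∀ s : PySem.Set β,
      PySem.Set.update s (l.flatMap f) = PySem.Set.update s ((PySem.Set.ofList l).flatMap f) := by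
  induction l using List.reverseRecOn with
  | nil => intro s; rfl
  | append_singleton l q ih =>
    intro s
    rw [List.flatMap_append, PySem.Set.update_append, PySem.Set.ofList_append_singleton]
    by_cases hq : q ∈ PySem.Set.ofList l
    · rw [PySem.Set.add_of_mem hq, ← ih s]
      refine pv_update_absorb _ _ (fun y hy => ?_)
      rw [PySem.Set.mem_update]
      exact Or.inr (List.mem_flatMap.mpr ⟨q, (PySem.Set.mem_ofList l q).mp hq, by simpa using hy⟩)
    · rw [PySem.Set.add_of_not_mem hq, List.flatMap_append, PySem.Set.update_append, ← ih s]

-- a loop over indices with pyGetD is a map over the list itself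
theorem pv_map_get {γ : Type} (tw : List String) (F : String → γ) :
    (PySem.List.pyRange 0 (tw.length : Int) 1).map (fun j => F (PySem.List.pyGetD tw j "")) =
      tw.map F := by
  have h := PySem.List.map_pyGetD_pyRange_zero' (xs := tw) (d := "")
  calc (PySem.List.pyRange 0 (tw.length : Int) 1).map (fun j => F (PySem.List.pyGetD tw j ""))
      = ((PySem.List.pyRange 0 (tw.length : Int) 1).map (fun j => PySem.List.pyGetD tw j "")).map F := by
        rw [List.map_map]; rfl
    _ = tw.map F := by rw [h]

theorem pv_flatMap_get {γ : Type} (tw : List String) (G : String → List γ) :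
    (PySem.List.pyRange 0 (tw.length : Int) 1).flatMap (fun j => G (PySem.List.pyGetD tw j "")) =
      tw.flatMap G := by
  rw [List.flatMap_def, pv_map_get tw G, ← List.flatMap_def]

theorem pv_update_single {α : Type} [BEq α] [LawfulBEq α] (s : PySem.Set α) (x : α) :
    PySem.Set.update s [x] = PySem.Set.add s x := by
  rw [PySem.Set.update_cons, PySem.Set.update_nil]

theorem pv_flatMap_replicate {α β : Type} (l : List α) (m : Nat) (x : β) :
    l.flatMap (fun _ => List.replicate m x) = List.replicate (l.length * m) x := by
  induction l with
  | nil => simp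
  | cons y l ih =>
    rw [List.flatMap_cons, ih, List.length_cons, Nat.succ_mul, Nat.add_comm,
      List.replicate_add]

-- ===== VERDICT (by name: the statement is the Claim_ definition above) =====
theorem generate_passwords_spec : Claim_equal_generate_passwords := by
  intro tw _
  show generate_passwords tw = generate_passwords_alt tw
  unfold generate_passwords
  rw [show PySem.List.pyRange 1 4 1 = [1, 2, 3] from by decide]
  simp only [List.foldl_cons, List.foldl_nil, PySem.List.foldl_append_singleton_eq_map,
    PySem.List.foldl_append_eq_flatMap, PySem.List.len_eq]
  norm_num
  rw [pv_flatMap_get tw (fun a => List.flatMap (fun _ => List.replicate tw.length a)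
        (PySem.List.pyRange 0 (tw.length : Int) 1)),
      pv_flatMap_get tw (fun a => List.flatMap
        (fun k => List.replicate tw.length (a ++ PySem.List.pyGetD tw k ""))
        (PySem.List.pyRange 0 (tw.length : Int) 1)),
      pv_flatMap_get tw (fun a => List.flatMap
        (fun k => List.map (fun l => a ++ PySem.List.pyGetD tw k "" ++ PySem.List.pyGetD tw l "")
          (PySem.List.pyRange 0 (tw.length : Int) 1))
        (PySem.List.pyRange 0 (tw.length : Int) 1))]
  have hrg : (PySem.List.pyRange 0 (tw.length : Int) 1).length = tw.length := by
    simp [PySem.List.length_pyRange_one]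
  have hG1 : (fun a => List.flatMap (fun _ => List.replicate tw.length a)
      (PySem.List.pyRange 0 (tw.length : Int) 1)) =
      fun a : String => List.replicate (tw.length * tw.length) a :=
    funext fun a => by rw [pv_flatMap_replicate, hrg]
  have hG2 : (fun a => List.flatMap
      (fun k => List.replicate tw.length (a ++ PySem.List.pyGetD tw k ""))
      (PySem.List.pyRange 0 (tw.length : Int) 1)) =
      fun a : String => List.flatMap (fun b => List.replicate tw.length (a ++ b)) tw :=
    funext fun a => pv_flatMap_get tw (fun b => List.replicate tw.length (a ++ b))
  have hG3 : (fun a => List.flatMap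
      (fun k => List.map (fun l => a ++ PySem.List.pyGetD tw k "" ++ PySem.List.pyGetD tw l "")
        (PySem.List.pyRange 0 (tw.length : Int) 1))
      (PySem.List.pyRange 0 (tw.length : Int) 1)) =
      fun a : String => List.flatMap (fun b => List.map (fun c => a ++ b ++ c) tw) tw :=
    funext fun a => by
      rw [pv_flatMap_get tw (fun b => List.map
        (fun l => a ++ b ++ PySem.List.pyGetD tw l "") (PySem.List.pyRange 0 (tw.length : Int) 1))]
      exact congrArg (fun g => List.flatMap g tw)
        (funext fun b => pv_map_get tw (fun c => a ++ b ++ c))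
  rw [hG1, hG2, hG3, PySem.Set.ofList_append, PySem.Set.update_append]
  show _ = PySem.Set.update
      (PySem.Set.update (PySem.Set.ofList tw)
        (PySem.List.dedup (List.flatMap (fun a => List.map (fun b => a ++ b) tw) tw)))
      (List.flatMap (fun p => List.map (fun c => p ++ c) tw)
        (PySem.List.dedup (List.flatMap (fun a => List.map (fun b => a ++ b) tw) tw)))
  rw [PySem.List.dedup_eq_ofList, pv_update_ofList,
    ← pv_update_flatMap_ofList (fun p => List.map (fun c => p ++ c) tw)]
  -- triples block: A's flat level-3 list IS pairs.flatMap (append each word)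
  have hT3 : List.flatMap (fun p => List.map (fun c => p ++ c) tw)
      (List.flatMap (fun a => List.map (fun b => a ++ b) tw) tw) =
      List.flatMap (fun a => List.flatMap (fun b => List.map (fun c => a ++ b ++ c) tw) tw) tw := by
    rw [List.flatMap_assoc]
    exact congrArg (fun g => List.flatMap g tw)
      (funext fun a => List.flatMap_map (fun b => a ++ b) (fun p => List.map (fun c => p ++ c) tw) tw)
  rw [hT3]
  -- singles block
  have h1 : PySem.Set.ofList (List.flatMap (fun a => List.replicate (tw.length * tw.length) a) tw) =
      PySem.Set.ofList tw := by
    rw [← PySem.Set.update_nil_left, ← PySem.Set.update_nil_left]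
    calc PySem.Set.update [] (List.flatMap (fun a => List.replicate (tw.length * tw.length) a) tw)
        = PySem.Set.update [] (List.flatMap (fun a => [a]) tw) := by
          refine pv_update_flatMap_congr tw _ _ (fun a ha s => ?_) []
          have hn : 0 < tw.length * tw.length :=
            Nat.mul_pos (List.length_pos_of_mem ha) (List.length_pos_of_mem ha)
          rw [pv_update_replicate _ hn, pv_update_single]
      _ = PySem.Set.update [] tw := by rw [List.flatMap_singleton']
  -- pairs block
  have h2 : ∀ s : PySem.Set String,
      PySem.Set.update s (List.flatMap (fun a => List.flatMap (fun b => List.replicate tw.length (a ++ b)) tw) tw) =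
      PySem.Set.update s (List.flatMap (fun a => List.map (fun b => a ++ b) tw) tw) := by
    intro s
    have hm : (fun a => List.map (fun b => a ++ b) tw) =
        fun a : String => List.flatMap (fun b => [a ++ b]) tw :=
      funext fun a => List.map_eq_flatMap
    rw [hm]
    refine pv_update_flatMap_congr tw _ _ (fun a ha s' => ?_) s
    refine pv_update_flatMap_congr tw _ _ (fun b hb s'' => ?_) s'
    rw [pv_update_replicate _ (List.length_pos_of_mem hb), pv_update_single]
  rw [h1, h2]
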